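-- pv_equiv track=rewrite | github.com/GValiente/gba-niccc | data_generator/export.py | generate_horizontal_line_sets
-- ===== SOURCE A (Python) =====
-- def generate_horizontal_line_sets(screen_buffer):
--     horizontal_line_sets = {}
--
--     for y, screen_line in enumerate(screen_buffer):
--         start_x = 0
--         current_color_index = screen_line[0]
--
--         for x, color_index in enumerate(screen_line):
--             if color_index != current_color_index:
--                 if current_color_index > 0:
--                     if current_color_index not in horizontal_line_sets:
--                         horizontal_line_sets[current_color_index] = []
--
--                     horizontal_line_sets[current_color_index].append((y, start_x, x - 1))
--
--                 start_x = x
--                 current_color_index = color_index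
--
--         if current_color_index > 0:
--             if current_color_index not in horizontal_line_sets:
--                 horizontal_line_sets[current_color_index] = []
--
--             horizontal_line_sets[current_color_index].append((y, start_x, len(screen_line) - 1))
--
--     return horizontal_line_sets
-- ===== SOURCE B (Python) =====
-- def generate_horizontal_line_sets(screen_buffer):
--     # Pass 1: per row, find change boundaries by comparing adjacent pixels,
--     # and turn consecutive boundary pairs into a flat list of colored segments.
--     segments = []
--     for y, row in enumerate(screen_buffer):
--         bounds = [0] + [x for x in range(1, len(row)) if row[x] != row[x - 1]] + [len(row)]
--         segments.extend((row[a], (y, a, b - 1)) for a, b in zip(bounds, bounds[1:]))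
--     # Pass 2: group the positive-color segments by color, in emission order.
--     result = {}
--     for color, seg in segments:
--         if color > 0:
--             result.setdefault(color, []).append(seg)
--     return result
-- ===== Notes on version B (the rewrite author's own statement) =====
-- stated objective: alternative
-- what changed: Replaces A's interleaved state-machine scan (start_x/current_color carried through the loop with a duplicated end-of-line flush that updates the dict as it scans) by two staged passes: pass 1 computes per-row change boundaries by comparing adjacent pixels and zips consecutive boundaries into a flat segment list; pass 2 groups the positive-color segments into the dict.
import Mathlib
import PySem

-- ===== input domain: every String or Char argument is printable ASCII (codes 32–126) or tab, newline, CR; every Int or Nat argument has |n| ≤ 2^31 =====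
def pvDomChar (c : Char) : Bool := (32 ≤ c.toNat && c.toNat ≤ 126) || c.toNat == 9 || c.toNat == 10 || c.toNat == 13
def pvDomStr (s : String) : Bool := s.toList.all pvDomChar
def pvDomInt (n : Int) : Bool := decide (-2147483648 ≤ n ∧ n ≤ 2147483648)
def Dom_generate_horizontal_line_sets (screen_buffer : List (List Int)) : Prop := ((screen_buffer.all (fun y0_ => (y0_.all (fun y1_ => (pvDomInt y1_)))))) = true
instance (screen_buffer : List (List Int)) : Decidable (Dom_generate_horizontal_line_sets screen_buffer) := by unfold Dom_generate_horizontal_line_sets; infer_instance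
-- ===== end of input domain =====

-- B replaces A's interleaved state-machine scan by two staged passes: pass 1 computes
-- per-row change boundaries (adjacent-pixel comparison) and zips them into a flat
-- segment list, pass 2 groups the positive-color segments (objective: alternative).

-- ===== PORT A =====
-- `if key not in d: d[key] = []` followed by `d[key].append(t)`
def pvPushA (d : PySem.Dict Int (List (Int × Int × Int))) (c : Int) (t : Int × Int × Int) :
    PySem.Dict Int (List (Int × Int × Int)) :=
  let d1 := if d.contains c then d else d.insert c []
  d1.modify c [] (· ++ [t])

-- the inner `for x, color_index in enumerate(screen_line)` loop, plus the trailing flush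
-- (when the list is exhausted, x = len(screen_line), so len(screen_line) - 1 = x - 1)
def pvAInner (y : Int) (x : Int) (sx : Int) (cur : Int)
    (d : PySem.Dict Int (List (Int × Int × Int))) :
    List Int → PySem.Dict Int (List (Int × Int × Int))
  | [] => if cur > 0 then pvPushA d cur (y, sx, x - 1) else d
  | color :: rest =>
    if color ≠ cur then
      pvAInner y (x + 1) x color (if cur > 0 then pvPushA d cur (y, sx, x - 1) else d) rest
    else
      pvAInner y (x + 1) sx cur d rest

def pvAOuter (y : Int) (d : PySem.Dict Int (List (Int × Int × Int))) :
    List (List Int) → PySem.Dict Int (List (Int × Int × Int))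
  | [] => d
  | line :: rest =>
    match line with
    | [] => pvAOuter (y + 1) d rest            -- Python raises IndexError here (excluded by Pre_)
    | c0 :: tail => pvAOuter (y + 1) (pvAInner y 0 0 c0 d (c0 :: tail)) rest

def generate_horizontal_line_sets (screen_buffer : List (List Int)) :
    List (Int × List (Int × Int × Int)) :=
  (pvAOuter 0 PySem.Dict.empty screen_buffer).items

-- ===== PORT B =====
-- `row[i]` for the in-range indices B uses (outside Pre_ Python raises IndexError; the
-- default is never reached on inputs admitted by Pre_)
def pvGetI (row : List Int) (i : Int) : Int := (PySem.List.pyGet? row i).getD 0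

-- `[x for x in range(1, len(row)) if row[x] != row[x - 1]]`
def pvChangePoints (row : List Int) : List Int :=
  (PySem.List.pyRange 1 (row.length : Int) 1).filter (fun x => pvGetI row x != pvGetI row (x - 1))

-- `[0] + changepoints + [len(row)]`
def pvBounds (row : List Int) : List Int :=
  [0] ++ pvChangePoints row ++ [(row.length : Int)]

-- `(row[a], (y, a, b - 1)) for a, b in zip(bounds, bounds[1:])`
def pvRowSegs (y : Int) (row : List Int) : List (Int × Int × Int × Int) :=
  (((pvBounds row).zip ((pvBounds row).drop 1)).map
    (fun ab => (pvGetI row ab.1, (y, ab.1, ab.2 - 1))))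

-- pass 1: `for y, row in enumerate(screen_buffer): segments.extend(...)`
def pvSegsOuter (y : Int) : List (List Int) → List (Int × Int × Int × Int)
  | [] => []
  | row :: rest => pvRowSegs y row ++ pvSegsOuter (y + 1) rest

-- `result.setdefault(color, []).append(seg)`
def pvPushB (d : PySem.Dict Int (List (Int × Int × Int))) (c : Int) (t : Int × Int × Int) :
    PySem.Dict Int (List (Int × Int × Int)) :=
  (d.setdefault c []).modify c [] (· ++ [t])

-- pass 2 loop body: `if color > 0: result.setdefault(color, []).append(seg)`
def pvStep (d : PySem.Dict Int (List (Int × Int × Int))) (p : Int × Int × Int × Int) :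
    PySem.Dict Int (List (Int × Int × Int)) :=
  if p.1 > 0 then pvPushB d p.1 p.2 else d

def generate_horizontal_line_sets_alt (screen_buffer : List (List Int)) :
    List (Int × List (Int × Int × Int)) :=
  ((pvSegsOuter 0 screen_buffer).foldl pvStep PySem.Dict.empty).items

-- ===== PRECONDITION & SPEC =====
-- Pre_ excludes buffers containing an empty row, on which A raises IndexError
-- (it indexes screen_line[0]); B raises IndexError there too (row[a] on the (0,0) pair).
def Pre_generate_horizontal_line_sets (screen_buffer : List (List Int)) : Prop :=
  ∀ line ∈ screen_buffer, line ≠ []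
instance (screen_buffer : List (List Int)) : Decidable (Pre_generate_horizontal_line_sets screen_buffer) := by unfold Pre_generate_horizontal_line_sets; infer_instance
def pvWitness_generate_horizontal_line_sets : List (List Int) := [[1, 0, 2, 2], [3, 3]]

def Spec_generate_horizontal_line_sets (screen_buffer : List (List Int)) (out : List (Int × List (Int × Int × Int))) : Prop := out = generate_horizontal_line_sets_alt screen_buffer
instance (screen_buffer : List (List Int)) (out : List (Int × List (Int × Int × Int))) : Decidable (Spec_generate_horizontal_line_sets screen_buffer out) := by unfold Spec_generate_horizontal_line_sets; infer_instance

-- ===== CLAIM (what is proved, stated in full; the proofs are below) =====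
def Claim_equal_generate_horizontal_line_sets : Prop := ∀ (screen_buffer : List (List Int)), Dom_generate_horizontal_line_sets screen_buffer → Pre_generate_horizontal_line_sets screen_buffer → Spec_generate_horizontal_line_sets screen_buffer (generate_horizontal_line_sets screen_buffer)

-- ===== LEMMAS AND PROOFS =====

-- length of the initial run of `c` in the remainder of the row (proof-only helper)
def pvRunLen (c : Int) : List Int → Nat
  | [] => 0
  | x :: xs => if x = c then pvRunLen c xs + 1 else 0

-- canonical run decomposition of a row, starting at x-coordinate i (proof-only helper)
def pvRuns (y : Int) (i : Int) : List Int → List (Int × Int × Int × Int)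
  | [] => []
  | c :: rest =>
    (c, (y, i, i + (pvRunLen c rest : Int))) ::
      pvRuns y (i + (pvRunLen c rest : Int) + 1) (rest.drop (pvRunLen c rest))
termination_by row => row.length
decreasing_by simp only [List.length_drop, List.length_cons]; omega

theorem pvRuns_nil (y i : Int) : pvRuns y i [] = [] := by rw [pvRuns]

theorem pvRuns_cons (y i c : Int) (rest : List Int) :
    pvRuns y i (c :: rest)
      = (c, (y, i, i + (pvRunLen c rest : Int))) ::
          pvRuns y (i + (pvRunLen c rest : Int) + 1) (rest.drop (pvRunLen c rest)) := by
  rw [pvRuns]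

theorem pvRunLen_le (c : Int) : ∀ (l : List Int), pvRunLen c l ≤ l.length := by
  intro l
  induction l with
  | nil => simp [pvRunLen]
  | cons a as ih => by_cases h : a = c <;> simp [pvRunLen, h]
                    omega

theorem pvReplicate_run (c : Int) :
    ∀ (rest : List Int),
      c :: rest = List.replicate (pvRunLen c rest + 1) c ++ rest.drop (pvRunLen c rest) := by
  intro rest
  induction rest with
  | nil => simp [pvRunLen]
  | cons a as ih =>
    by_cases h : a = c
    · subst h
      have h2 : pvRunLen a (a :: as) = pvRunLen a as + 1 := by simp [pvRunLen]
      rw [h2, List.drop_succ_cons, List.replicate_succ, List.cons_append, ← ih]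
    · simp [pvRunLen, h]

theorem pvRunLen_drop_head (c : Int) :
    ∀ (rest : List Int), ∀ r rs, rest.drop (pvRunLen c rest) = r :: rs → r ≠ c := by
  intro rest
  induction rest with
  | nil => intro r rs h; simp at h
  | cons a as ih =>
    intro r rs h
    by_cases ha : a = c
    · subst ha
      have h2 : pvRunLen a (a :: as) = pvRunLen a as + 1 := by simp [pvRunLen]
      rw [h2] at h
      simp only [List.drop_succ_cons] at h
      exact ih r rs h
    · have h0 : pvRunLen c (a :: as) = 0 := by simp [pvRunLen, ha]
      rw [h0] at h
      simp at h
      rcases h with ⟨h1, _⟩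
      subst h1
      exact ha

theorem pvPush_eq (d : PySem.Dict Int (List (Int × Int × Int))) (c : Int) (t : Int × Int × Int) :
    pvPushA d c t = pvPushB d c t := by
  by_cases h : d.contains c
  · simp [pvPushA, pvPushB, PySem.Dict.setdefault, h]
  · simp only [pvPushA, pvPushB, PySem.Dict.setdefault, h, Bool.false_eq_true, if_false]
    congr 1
    apply PySem.Dict.ext
    rw [PySem.Dict.items_insert_of_not_contains]
    simpa using h

-- ===== A-side: the state-machine loop computes the fold of pvStep over pvRuns =====

theorem pvAInner_skip (y sx : Int) (c : Int) :
    ∀ (rest : List Int) (x : Int) (d : PySem.Dict Int (List (Int × Int × Int))),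
      pvAInner y x sx c d rest
        = pvAInner y (x + pvRunLen c rest) sx c d (rest.drop (pvRunLen c rest)) := by
  intro rest
  induction rest with
  | nil => intro x d; simp [pvRunLen]
  | cons r rs ih =>
    intro x d
    by_cases h : r = c
    · subst h
      have h1 : pvAInner y x sx r d (r :: rs) = pvAInner y (x + 1) sx r d rs := by
        simp [pvAInner]
      rw [h1, ih]
      have h2 : pvRunLen r (r :: rs) = pvRunLen r rs + 1 := by simp [pvRunLen]
      rw [h2]
      have hx : x + 1 + (pvRunLen r rs : Int) = x + ((pvRunLen r rs + 1 : Nat) : Int) := by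
        push_cast; ring
      rw [hx, List.drop_succ_cons]
    · have h0 : pvRunLen c (r :: rs) = 0 := by simp [pvRunLen, h]
      simp [h0]

theorem pvAInner_eq_runs (y : Int) :
    ∀ (n : Nat) (rest : List Int), rest.length ≤ n →
      ∀ (c i : Int) (d : PySem.Dict Int (List (Int × Int × Int))),
        pvAInner y (i + 1) i c d rest = (pvRuns y i (c :: rest)).foldl pvStep d := by
  intro n
  induction n with
  | zero =>
    intro rest hlen c i d
    have hr : rest = [] := List.eq_nil_of_length_eq_zero (Nat.le_zero.mp hlen)
    subst hr
    rw [pvRuns_cons]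
    simp [pvAInner, pvRunLen, pvRuns_nil, pvStep, pvPush_eq]
  | succ m ih =>
    intro rest hlen c i d
    rw [pvAInner_skip]
    rcases hdrop : rest.drop (pvRunLen c rest) with _ | ⟨r, rs⟩
    · rw [pvRuns_cons, hdrop, pvRuns_nil]
      simp only [pvAInner, List.foldl_cons, List.foldl_nil, pvStep]
      have e1 : i + 1 + (pvRunLen c rest : Int) - 1 = i + (pvRunLen c rest : Int) := by ring
      rw [e1, pvPush_eq]
    · have hrc : r ≠ c := pvRunLen_drop_head c rest r rs hdrop
      have hlen2 : rs.length ≤ m := by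
        have h1 : (rest.drop (pvRunLen c rest)).length = rest.length - pvRunLen c rest := by simp
        rw [hdrop] at h1
        simp at h1
        omega
      rw [pvAInner]
      simp only [if_pos hrc]
      have e1 : i + 1 + (pvRunLen c rest : Int) = (i + (pvRunLen c rest : Int) + 1) := by ring
      rw [e1, ih rs hlen2 r (i + (pvRunLen c rest : Int) + 1)]
      conv_rhs => rw [pvRuns_cons, hdrop]
      simp only [List.foldl_cons, pvStep]
      have e2 : i + (pvRunLen c rest : Int) + 1 - 1 = i + (pvRunLen c rest : Int) := by ring
      rw [e2, pvPush_eq]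

-- ===== B-side: boundary zipping computes pvRuns =====

theorem pvGetI_repl_left (c : Int) (m : Nat) (t : List Int) (x : Int)
    (h0 : 0 ≤ x) (h1 : x < (m : Int)) : pvGetI (List.replicate m c ++ t) x = c := by
  unfold pvGetI
  rw [PySem.List.pyGet?_of_nonneg _ h0]
  rw [List.getElem?_append_left (by simp; omega)]
  rw [List.getElem?_replicate]
  rw [if_pos (by omega : x.toNat < m)]
  rfl

theorem pvGetI_repl_right (c : Int) (m : Nat) (t : List Int) (j : Int)
    (h0 : 0 ≤ j) : pvGetI (List.replicate m c ++ t) ((m : Int) + j) = pvGetI t j := by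
  unfold pvGetI
  have e : (m : Int) + j = ((List.replicate m c).length : Int) + ((j.toNat : Nat) : Int) := by
    simp; omega
  rw [e, PySem.List.pyGet?_append_right, PySem.List.pyGet?_of_nonneg _ h0]

theorem pvGetI_run (c : Int) (rest : List Int) (x : Int)
    (h0 : 0 ≤ x) (h1 : x < (pvRunLen c rest : Int) + 1) : pvGetI (c :: rest) x = c := by
  rw [pvReplicate_run c rest]
  exact pvGetI_repl_left c (pvRunLen c rest + 1) _ x h0 (by push_cast; omega)

theorem pvGetI_run_right (c : Int) (rest : List Int) (j : Int) (h0 : 0 ≤ j) :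
    pvGetI (c :: rest) ((pvRunLen c rest : Int) + 1 + j)
      = pvGetI (rest.drop (pvRunLen c rest)) j := by
  conv_lhs => rw [pvReplicate_run c rest]
  have e : (pvRunLen c rest : Int) + 1 + j = ((pvRunLen c rest + 1 : Nat) : Int) + j := by
    push_cast; ring
  rw [e]
  exact pvGetI_repl_right c (pvRunLen c rest + 1) _ j h0

theorem pvBounds_nonneg (row : List Int) : ∀ x ∈ pvBounds row, 0 ≤ x := by
  intro x hx
  simp only [pvBounds, pvChangePoints, List.mem_append, List.mem_cons, List.not_mem_nil,
    or_false, List.mem_filter] at hx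
  rcases hx with (h | h) | h
  · omega
  · have := (PySem.List.mem_pyRange_one.mp h.1).1; omega
  · subst h; exact Int.natCast_nonneg _

theorem pvCP_nil (c : Int) (rest : List Int)
    (h : rest.drop (pvRunLen c rest) = []) : pvChangePoints (c :: rest) = [] := by
  have hk := pvRunLen_le c rest
  have hlen : rest.length = pvRunLen c rest := by
    have h1 := List.drop_eq_nil_iff.mp h
    omega
  unfold pvChangePoints
  apply List.filter_eq_nil_iff.mpr
  intro x hx
  have hb := PySem.List.mem_pyRange_one.mp hx
  have hx1 : x < (pvRunLen c rest : Int) + 1 := by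
    have e : ((c :: rest).length : Int) = (pvRunLen c rest : Int) + 1 := by
      simp [hlen]
    omega
  rw [pvGetI_run c rest x (by omega) hx1,
      pvGetI_run c rest (x - 1) (by omega) (by omega)]
  simp

theorem pvCP_cons (c : Int) (rest : List Int) (r : Int) (rs : List Int)
    (h : rest.drop (pvRunLen c rest) = r :: rs) :
    pvChangePoints (c :: rest)
      = ((pvRunLen c rest : Int) + 1) ::
          (pvChangePoints (r :: rs)).map (· + ((pvRunLen c rest : Int) + 1)) := by
  have hk := pvRunLen_le c rest
  have hne : r ≠ c := pvRunLen_drop_head c rest r rs h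
  have hdl : (r :: rs).length = rest.length - pvRunLen c rest := by
    rw [← h]; simp
  have hn : ((c :: rest).length : Int)
      = (pvRunLen c rest : Int) + 1 + ((r :: rs).length : Int) := by
    simp only [List.length_cons] at hdl ⊢
    push_cast
    omega
  unfold pvChangePoints
  rw [hn, PySem.List.pyRange_one_append 1 ((pvRunLen c rest : Int) + 1) _
        (by omega) (by have : (0 : Int) ≤ ((r :: rs).length : Int) := Int.natCast_nonneg _; omega),
      List.filter_append]
  have hfirst : (PySem.List.pyRange 1 ((pvRunLen c rest : Int) + 1) 1).filter
      (fun x => pvGetI (c :: rest) x != pvGetI (c :: rest) (x - 1)) = [] := by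
    apply List.filter_eq_nil_iff.mpr
    intro x hx
    have hb := PySem.List.mem_pyRange_one.mp hx
    rw [pvGetI_run c rest x (by omega) (by omega),
        pvGetI_run c rest (x - 1) (by omega) (by omega)]
    simp
  rw [hfirst, List.nil_append]
  have hlt : (pvRunLen c rest : Int) + 1
      < (pvRunLen c rest : Int) + 1 + ((r :: rs).length : Int) := by
    simp only [List.length_cons]; push_cast; omega
  rw [PySem.List.pyRange_one_cons hlt, List.filter_cons]
  have ehead : pvGetI (c :: rest) ((pvRunLen c rest : Int) + 1) = r := by
    have h1 := pvGetI_run_right c rest 0 le_rfl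
    rw [add_zero] at h1
    rw [h1, h]
    simp [pvGetI]
  have eprev : pvGetI (c :: rest) ((pvRunLen c rest : Int) + 1 - 1) = c :=
    pvGetI_run c rest _ (by omega) (by omega)
  rw [ehead, eprev, if_pos (bne_iff_ne.mpr hne)]
  congr 1
  -- the remaining positions are the changepoints of the tail, shifted by k+1
  have hshift : PySem.List.pyRange ((pvRunLen c rest : Int) + 1 + 1)
        ((pvRunLen c rest : Int) + 1 + ((r :: rs).length : Int)) 1
      = (PySem.List.pyRange 1 ((r :: rs).length : Int) 1).map
          (· + ((pvRunLen c rest : Int) + 1)) := by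
    rw [PySem.List.pyRange_one, PySem.List.pyRange_one, List.map_map]
    have e : ((pvRunLen c rest : Int) + 1 + ((r :: rs).length : Int)
        - ((pvRunLen c rest : Int) + 1 + 1)).toNat = (((r :: rs).length : Int) - 1).toNat := by
      omega
    rw [e]
    apply List.map_congr_left
    intro a _
    simp only [Function.comp_apply]
    ring
  rw [hshift, List.filter_map]
  have hpred : ∀ x ∈ PySem.List.pyRange 1 ((r :: rs).length : Int) 1,
      ((fun z => pvGetI (c :: rest) z != pvGetI (c :: rest) (z - 1))
          ∘ (· + ((pvRunLen c rest : Int) + 1))) x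
        = (pvGetI (r :: rs) x != pvGetI (r :: rs) (x - 1)) := by
    intro x hx
    have hb := PySem.List.mem_pyRange_one.mp hx
    simp only [Function.comp_apply]
    have e1 : pvGetI (c :: rest) (x + ((pvRunLen c rest : Int) + 1)) = pvGetI (r :: rs) x := by
      have h1 := pvGetI_run_right c rest x (by omega)
      rw [h] at h1
      rw [← h1]
      congr 1
      ring
    have e2 : pvGetI (c :: rest) (x + ((pvRunLen c rest : Int) + 1) - 1)
        = pvGetI (r :: rs) (x - 1) := by
      have h1 := pvGetI_run_right c rest (x - 1) (by omega)
      rw [h] at h1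
      rw [← h1]
      congr 1
      ring
    rw [e1, e2]
  rw [List.filter_congr hpred]

theorem pvRuns_shift (y t : Int) :
    ∀ (n : Nat) (row : List Int), row.length ≤ n → ∀ (i : Int),
      pvRuns y (i + t) row
        = (pvRuns y i row).map (fun p => (p.1, p.2.1, p.2.2.1 + t, p.2.2.2 + t)) := by
  intro n
  induction n with
  | zero =>
    intro row hlen i
    have : row = [] := List.eq_nil_of_length_eq_zero (Nat.le_zero.mp hlen)
    subst this
    simp [pvRuns_nil]
  | succ m ih =>
    intro row hlen i
    rcases row with _ | ⟨c, rest⟩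
    · simp [pvRuns_nil]
    · rw [pvRuns_cons, pvRuns_cons, List.map_cons]
      dsimp only
      have e1 : i + t + (pvRunLen c rest : Int) = i + (pvRunLen c rest : Int) + t := by ring
      rw [e1]
      rw [show i + (pvRunLen c rest : Int) + t + 1
            = (i + (pvRunLen c rest : Int) + 1) + t from by ring]
      rw [ih (rest.drop (pvRunLen c rest))
            (by simp only [List.length_drop]; simp at hlen; omega)]

theorem pvZip_consec_map (l : List Int) (f : Int → Int) :
    (l.map f).zip ((l.map f).drop 1) = (l.zip (l.drop 1)).map (Prod.map f f) := by
  rw [← List.map_drop, List.zip_map]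

theorem pvRowSegs_eq (y : Int) :
    ∀ (n : Nat) (row : List Int), row.length ≤ n → row ≠ [] →
      pvRowSegs y row = pvRuns y 0 row := by
  intro n
  induction n with
  | zero =>
    intro row hlen hne
    exact absurd (List.eq_nil_of_length_eq_zero (Nat.le_zero.mp hlen)) hne
  | succ m ih =>
    intro row hlen hne
    rcases row with _ | ⟨c, rest⟩
    · exact absurd rfl hne
    rcases hdrop : rest.drop (pvRunLen c rest) with _ | ⟨r, rs⟩
    · -- the whole row is one run
      have hk := pvRunLen_le c rest
      have hlen2 : rest.length = pvRunLen c rest := by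
        have h1 := List.drop_eq_nil_iff.mp hdrop
        omega
      rw [pvRuns_cons, hdrop, pvRuns_nil]
      unfold pvRowSegs pvBounds
      rw [pvCP_nil c rest hdrop]
      simp only [List.nil_append, List.append_nil, List.cons_append, List.drop_succ_cons]
      have hg : pvGetI (c :: rest) 0 = c := pvGetI_run c rest 0 le_rfl (by omega)
      simp [List.zip_cons_cons, hg, hlen2]
    · -- first run, then the rest of the row
      have hk := pvRunLen_le c rest
      have hdl : (r :: rs).length = rest.length - pvRunLen c rest := by
        rw [← hdrop]; simp
      have hlen3 : (r :: rs).length ≤ m := by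
        have h1 : (rest.drop (pvRunLen c rest)).length ≤ rest.length := by simp
        rw [hdrop] at h1
        have h2 : rest.length + 1 ≤ m + 1 := by simpa using hlen
        omega
      have hb : pvBounds (c :: rest)
          = 0 :: (pvBounds (r :: rs)).map (· + ((pvRunLen c rest : Int) + 1)) := by
        have h1 : (rest.drop (pvRunLen c rest)).length = rest.length - pvRunLen c rest := by
          simp
        rw [hdrop] at h1
        have hk2 := pvRunLen_le c rest
        have hnn : ((c :: rest).length : Int)
            = ((r :: rs).length : Int) + ((pvRunLen c rest : Int) + 1) := by
          simp only [List.length_cons] at h1 ⊢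
          push_cast
          omega
        unfold pvBounds
        rw [pvCP_cons c rest r rs hdrop, hnn]
        simp only [List.map_append, List.map_cons, List.map_nil, List.cons_append,
          List.nil_append]
        rw [show (0 : Int) + ((pvRunLen c rest : Int) + 1) = (pvRunLen c rest : Int) + 1 from
          by ring]
      unfold pvRowSegs
      rw [hb]
      have hB0 : pvBounds (r :: rs)
          = 0 :: (pvChangePoints (r :: rs) ++ [((r :: rs).length : Int)]) := rfl
      have htail : (((0 : Int) + ((pvRunLen c rest : Int) + 1)) ::
            ((pvChangePoints (r :: rs) ++ [((r :: rs).length : Int)]).map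
              (· + ((pvRunLen c rest : Int) + 1)))).zip
            ((pvChangePoints (r :: rs) ++ [((r :: rs).length : Int)]).map
              (· + ((pvRunLen c rest : Int) + 1)))
          = ((pvBounds (r :: rs)).zip ((pvBounds (r :: rs)).drop 1)).map
              (Prod.map (· + ((pvRunLen c rest : Int) + 1)) (· + ((pvRunLen c rest : Int) + 1))) := by
        rw [← pvZip_consec_map]
        simp only [hB0, List.map_cons, List.drop_succ_cons, List.drop_zero]
      rw [hB0]
      simp only [List.map_cons, List.drop_succ_cons, List.drop_zero, List.zip_cons_cons,
        List.map_cons]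
      rw [htail]
      have hg : pvGetI (c :: rest) 0 = c := pvGetI_run c rest 0 le_rfl (by omega)
      rw [pvRuns_cons, hdrop]
      have hhead : (pvGetI (c :: rest) 0, (y, (0 : Int), 0 + ((pvRunLen c rest : Int) + 1) - 1))
          = (c, (y, (0 : Int), 0 + (pvRunLen c rest : Int))) := by
        rw [hg]; norm_num
      rw [hhead]
      congr 1
      rw [List.map_map]
      have hpt : ∀ ab ∈ (pvBounds (r :: rs)).zip ((pvBounds (r :: rs)).drop 1),
          ((fun ab : Int × Int => (pvGetI (c :: rest) ab.1, (y, ab.1, ab.2 - 1)))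
              ∘ Prod.map (· + ((pvRunLen c rest : Int) + 1)) (· + ((pvRunLen c rest : Int) + 1))) ab
            = ((fun p : Int × Int × Int × Int =>
                  (p.1, p.2.1, p.2.2.1 + ((pvRunLen c rest : Int) + 1),
                    p.2.2.2 + ((pvRunLen c rest : Int) + 1)))
                ∘ (fun ab : Int × Int => (pvGetI (r :: rs) ab.1, (y, ab.1, ab.2 - 1)))) ab := by
        intro ab hab
        have ha1 : ab.1 ∈ pvBounds (r :: rs) := (List.of_mem_zip hab).1
        have ha0 : 0 ≤ ab.1 := pvBounds_nonneg _ _ ha1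
        simp only [Function.comp_apply, Prod.map]
        have e1 : pvGetI (c :: rest) (ab.1 + ((pvRunLen c rest : Int) + 1))
            = pvGetI (r :: rs) ab.1 := by
          have h1 := pvGetI_run_right c rest ab.1 ha0
          rw [hdrop] at h1
          rw [← h1]
          congr 1
          ring
        have e2 : ab.2 + ((pvRunLen c rest : Int) + 1) - 1
            = ab.2 - 1 + ((pvRunLen c rest : Int) + 1) := by ring
        rw [e1, e2]
      rw [List.map_congr_left hpt, ← List.map_map]
      have hIH : ((pvBounds (r :: rs)).zip ((pvBounds (r :: rs)).drop 1)).map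
            (fun ab : Int × Int => (pvGetI (r :: rs) ab.1, (y, ab.1, ab.2 - 1)))
          = pvRuns y 0 (r :: rs) := ih (r :: rs) hlen3 (by simp)
      rw [hIH]
      have hsh := pvRuns_shift y ((pvRunLen c rest : Int) + 1) (r :: rs).length (r :: rs)
        (le_refl _) 0
      rw [zero_add] at hsh
      rw [← hsh]
      congr 1
      ring

theorem pvOuter_eq :
    ∀ (sb : List (List Int)) (y : Int) (d : PySem.Dict Int (List (Int × Int × Int))),
      (∀ line ∈ sb, line ≠ []) →
        pvAOuter y d sb = (pvSegsOuter y sb).foldl pvStep d := by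
  intro sb
  induction sb with
  | nil => intro y d _; rfl
  | cons row rest ih =>
    intro y d hpre
    rcases row with _ | ⟨c0, tail⟩
    · exact absurd rfl (hpre [] (by simp))
    · rw [pvAOuter, pvSegsOuter, List.foldl_append]
      have h1 : pvAInner y 0 0 c0 d (c0 :: tail) = pvAInner y 1 0 c0 d tail := by
        simp [pvAInner]
      have h2 : pvAInner y 1 0 c0 d tail = (pvRuns y 0 (c0 :: tail)).foldl pvStep d := by
        have h := pvAInner_eq_runs y tail.length tail (le_refl _) c0 0 d
        norm_num at h
        exact h
      have h3 : pvRowSegs y (c0 :: tail) = pvRuns y 0 (c0 :: tail) :=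
        pvRowSegs_eq y (c0 :: tail).length _ (le_refl _) (by simp)
      rw [h1, h2, h3]
      exact ih (y + 1) _ (fun l hl => hpre l (List.mem_cons_of_mem _ hl))

-- ===== VERDICT (by name: the statement is the Claim_ definition above) =====
theorem generate_horizontal_line_sets_spec : Claim_equal_generate_horizontal_line_sets := by
  intro sb _ hpre
  unfold Spec_generate_horizontal_line_sets generate_horizontal_line_sets generate_horizontal_line_sets_alt
  rw [pvOuter_eq sb 0 PySem.Dict.empty hpre]
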